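-- pv_equiv track=rewrite | github.com/pypi-data/pypi-mirror-348 | packages/titanq/titanq-0.37.1-py3-none-any.whl/titanq/_event/sink/display_util.py | generate_word_animation
-- ===== SOURCE A (Python) =====
-- def generate_word_animation(word: str):
--     """Generates a cool TITANQ ASCII animation, returned in a list by frames"""
--     word_len = len(word)
--     frame = "." * word_len
--     frames = [frame]
--
--     for (target_position, letter) in enumerate(word):
--         current_index = word_len - 1
--         frame = frame[:-1] + letter
--         frames.append(frame)
--
--         while current_index != target_position-1:
--             frame = (frame[:current_index] + letter).ljust(word_len, ".")
--             frames.append(frame)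
--             current_index -= 1
--
--     frames.append("TITANQ")
--     frames.append("TITAN•")
--     frames.append("TITA•Q")
--     frames.append("TIT•NQ")
--     frames.append("TI•ANQ")
--     frames.append("T•TANQ")
--     frames.append("•ITANQ")
--     frames.append("••••••")
--     frames.append("TITANQ")
--     frames.append("••••••")
--     frames.append("TITANQ")
--     return frames
-- ===== SOURCE B (Python) =====
-- _TAIL = [
--     "TITANQ", "TITAN\u2022", "TITA\u2022Q", "TIT\u2022NQ", "TI\u2022ANQ",
--     "T\u2022TANQ", "\u2022ITANQ", "\u2022\u2022\u2022\u2022\u2022\u2022",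
--     "TITANQ", "\u2022\u2022\u2022\u2022\u2022\u2022", "TITANQ",
-- ]
--
--
-- def generate_word_animation(word: str):
--     """Generates a cool TITANQ ASCII animation, returned in a list by frames"""
--     n = len(word)
--     frames = ["." * n]
--     for t, letter in enumerate(word):
--         # the letter slides from the right edge to its target position t;
--         # each frame is computed positionally (k dots after the letter)
--         seq = [word[:t] + "." * (n - 1 - k - t) + letter + "." * k
--                for k in range(n - t)]
--         frames.append(seq[0])  # the sliding letter holds its first position one extra frame
--         frames.extend(seq)
--     frames.extend(_TAIL)
--     return frames
-- ===== Notes on version B (the rewrite author's own statement) =====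
-- stated objective: alternative
-- what changed: Each animation frame is computed by a closed positional formula (prefix + dots + letter + dots) over a range, instead of threading and repeatedly slicing/padding one mutable frame string through a while loop.
import Mathlib
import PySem

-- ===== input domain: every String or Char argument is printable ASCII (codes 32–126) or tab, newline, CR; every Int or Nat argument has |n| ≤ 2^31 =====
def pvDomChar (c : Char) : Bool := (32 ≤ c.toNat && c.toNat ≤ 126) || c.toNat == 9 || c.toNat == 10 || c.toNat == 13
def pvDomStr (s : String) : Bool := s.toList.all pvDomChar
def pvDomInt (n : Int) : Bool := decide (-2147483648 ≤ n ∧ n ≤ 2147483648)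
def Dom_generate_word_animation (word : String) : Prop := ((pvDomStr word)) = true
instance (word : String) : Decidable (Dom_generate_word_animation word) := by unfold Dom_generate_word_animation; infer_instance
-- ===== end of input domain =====

-- B computes every frame by a closed positional formula over a range instead of threading one
-- mutable frame string through slicing/ljust (objective: alternative decomposition, same cost).

-- ===== PORT A =====
-- s.ljust(n, ".") — exact hand port: pad on the right with '.' up to length n (no-op when already ≥ n)
def pyLjustDot (s : List Char) (n : Nat) : List Char := s ++ List.replicate (n - s.length) '.'

-- the 'while current_index != target_position - 1' loop; the Nat argument is fuel that only
-- makes the recursion structural (the call site passes wordLen + 1, more than the iteration count)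
def aWhile (letter : Char) (wordLen : Nat) (t : Int) (ci : Int) (frame : List Char)
    (frames : List (List Char)) : Nat → List Char × List (List Char)
  | 0 => (frame, frames)
  | fuel + 1 =>
    if ci = t - 1 then (frame, frames)
    else
      let frame' := pyLjustDot (PySem.List.slice frame none (some ci) ++ [letter]) wordLen
      aWhile letter wordLen t (ci - 1) frame' (frames ++ [frame']) fuel

-- one iteration of 'for (target_position, letter) in enumerate(word)'
def aStep (wordLen : Nat) (st : List Char × List (List Char)) (p : Int × Char) :
    List Char × List (List Char) :=
  let frame := PySem.List.slice st.1 none (some (-1)) ++ [p.2]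
  aWhile p.2 wordLen p.1 ((wordLen : Int) - 1) frame (st.2 ++ [frame]) (wordLen + 1)

def generate_word_animation (word : String) : List String :=
  let cs := word.toList
  let n := cs.length
  let st := (PySem.List.enumerate cs 0).foldl (aStep n) (List.replicate n '.', [List.replicate n '.'])
  st.2.map String.ofList ++
    ["TITANQ", "TITAN•", "TITA•Q", "TIT•NQ", "TI•ANQ", "T•TANQ", "•ITANQ",
     "••••••", "TITANQ", "••••••", "TITANQ"]

-- ===== PORT B =====
def bTail : List String :=
  ["TITANQ", "TITAN•", "TITA•Q", "TIT•NQ", "TI•ANQ", "T•TANQ", "•ITANQ",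
   "••••••", "TITANQ", "••••••", "TITANQ"]

-- seq = [word[:t] + "." * (n - 1 - k - t) + letter + "." * k for k in range(n - t)]
def bSeq (cs : List Char) (n : Nat) (t : Int) (letter : Char) : List (List Char) :=
  (PySem.List.pyRange 0 ((n : Int) - t) 1).map (fun k =>
    PySem.List.slice cs none (some t) ++ PySem.List.pyRepeat ['.'] ((n : Int) - 1 - k - t)
      ++ [letter] ++ PySem.List.pyRepeat ['.'] k)

def generate_word_animation_alt (word : String) : List String :=
  let cs := word.toList
  let n := cs.length
  let frames := (PySem.List.enumerate cs 0).foldl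
    (fun (frames : List (List Char)) p =>
      -- frames.append(seq[0]); frames.extend(seq)
      frames ++ [PySem.List.pyGetD (bSeq cs n p.1 p.2) 0 []] ++ bSeq cs n p.1 p.2)
    [List.replicate n '.']
  frames.map String.ofList ++ bTail

-- ===== PRECONDITION & SPEC =====
def Spec_generate_word_animation (word : String) (out : List String) : Prop := out = generate_word_animation_alt word
instance (word : String) (out : List String) : Decidable (Spec_generate_word_animation word out) := by unfold Spec_generate_word_animation; infer_instance

-- ===== CLAIM (what is proved, stated in full; the proofs are below) =====
def Claim_equal_generate_word_animation : Prop := ∀ (word : String), Dom_generate_word_animation word → Spec_generate_word_animation word (generate_word_animation word)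

-- ===== LEMMAS AND PROOFS =====

-- the frame showing `letter` at position ci while the first t letters are already in place
def pvFrm (cs : List Char) (t ci : Nat) (letter : Char) : List Char :=
  cs.take t ++ List.replicate (ci - t) '.' ++ [letter] ++ List.replicate (cs.length - 1 - ci) '.'

-- all frames A appends for one target position t with letter c (the head is the duplicated first frame)
def blockF (cs : List Char) (t : Nat) (c : Char) : List (List Char) :=
  pvFrm cs t (cs.length - 1) c ::
    (List.range (cs.length - t)).map (fun j => pvFrm cs t (cs.length - 1 - j) c)

-- all frames appended for targets t, t+1, … matching the character suffix `rest`
def blocksF (cs : List Char) (t : Nat) : List Char → List (List Char)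
  | [] => []
  | c :: r => blockF cs t c ++ blocksF cs (t + 1) r

theorem aWhile_eq (cs : List Char) (letter : Char) (t : Nat) :
    ∀ (k fuel : Nat) (frame : List Char) (frames : List (List Char)),
    t + k < cs.length →
    k < fuel →
    frame.take (t + k) = cs.take t ++ List.replicate k '.' →
    aWhile letter cs.length (t : Int) ((t + k : Nat) : Int) frame frames fuel
      = (pvFrm cs t t letter,
         frames ++ (List.range (k + 1)).map (fun j => pvFrm cs t (t + k - j) letter)) := by
  have htake : ∀ t' : Nat, t' ≤ cs.length → (cs.take t').length = t' := by
    intro t' h; simp [List.length_take]; omega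
  intro k
  induction k with
  | zero =>
    intro fuel frame frames ht hfuel hframe
    have ht' := htake t (by omega)
    cases fuel with
    | zero => omega
    | succ f =>
      have hc : ¬ (((t + 0 : Nat) : Int) = (t : Int) - 1) := by push_cast; omega
      simp only [aWhile, if_neg hc]
      have hslice : PySem.List.slice frame none (some ((t + 0 : Nat) : Int)) = cs.take t := by
        rw [PySem.List.slice_to_natCast]
        simpa using hframe
      have hfr : pyLjustDot (PySem.List.slice frame none (some ((t + 0 : Nat) : Int)) ++ [letter]) cs.length
          = pvFrm cs t t letter := by
        rw [hslice]
        simp only [pyLjustDot, pvFrm]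
        rw [show (cs.take t ++ [letter]).length = t + 1 from by simp [List.length_take]; omega,
          show cs.length - (t + 1) = cs.length - 1 - t from by omega]
        simp
      rw [hfr]
      have hstop : aWhile letter cs.length (t : Int) (((t + 0 : Nat) : Int) - 1) (pvFrm cs t t letter)
          (frames ++ [pvFrm cs t t letter]) f = (pvFrm cs t t letter, frames ++ [pvFrm cs t t letter]) := by
        cases f with
        | zero => rfl
        | succ f' => simp [aWhile]
      rw [hstop]
      simp
  | succ k ih =>
    intro fuel frame frames ht hfuel hframe
    have ht' := htake t (by omega)
    cases fuel with
    | zero => omega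
    | succ f =>
      have hc : ¬ (((t + (k + 1) : Nat) : Int) = (t : Int) - 1) := by push_cast; omega
      simp only [aWhile, if_neg hc]
      have hslice : PySem.List.slice frame none (some ((t + (k + 1) : Nat) : Int))
          = cs.take t ++ List.replicate (k + 1) '.' := by
        rw [PySem.List.slice_to_natCast]; exact hframe
      have hk1 : t + (k + 1) - t = k + 1 := by omega
      have hfr : pyLjustDot (PySem.List.slice frame none (some ((t + (k + 1) : Nat) : Int)) ++ [letter]) cs.length
          = pvFrm cs t (t + (k + 1)) letter := by
        rw [hslice]
        simp only [pyLjustDot, pvFrm, hk1]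
        rw [show (cs.take t ++ List.replicate (k + 1) '.' ++ [letter]).length = t + (k + 1) + 1 from by
            simp [List.length_take]; omega,
          show cs.length - (t + (k + 1) + 1) = cs.length - 1 - (t + (k + 1)) from by omega]
      rw [hfr]
      have hci : ((t + (k + 1) : Nat) : Int) - 1 = ((t + k : Nat) : Int) := by push_cast; omega
      rw [hci]
      have htk : List.take (t + k) (pvFrm cs t (t + (k + 1)) letter)
          = cs.take t ++ List.replicate k '.' := by
        simp only [pvFrm, hk1, List.append_assoc]
        rw [List.take_append, List.take_of_length_le (by rw [ht']; omega : (cs.take t).length ≤ t + k), ht',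
          List.take_append, List.length_replicate, List.take_replicate]
        rw [show min (t + k - t) (k + 1) = k from by omega,
          show t + k - t - (k + 1) = 0 from by omega]
        simp
      rw [ih f (pvFrm cs t (t + (k + 1)) letter) (frames ++ [pvFrm cs t (t + (k + 1)) letter])
        (by omega) (by omega) htk]
      have hlist : (List.range (k + 1 + 1)).map (fun j => pvFrm cs t (t + (k + 1) - j) letter)
          = pvFrm cs t (t + (k + 1)) letter ::
            (List.range (k + 1)).map (fun j => pvFrm cs t (t + k - j) letter) := by
        rw [List.range_succ_eq_map, List.map_cons, List.map_map]
        congr 1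
        apply List.map_congr_left
        intro j hj
        simp only [Function.comp]
        congr 1
        omega
      rw [hlist]
      simp

theorem aFold_eq (cs : List Char) : ∀ (rest : List Char) (t : Nat) (frames0 : List (List Char)),
    cs.drop t = rest →
    (PySem.List.enumerate rest (t : Int)).foldl (aStep cs.length)
        (cs.take t ++ List.replicate (cs.length - t) '.', frames0)
      = (cs ++ List.replicate (cs.length - (t + cs.length)) '.', frames0 ++ blocksF cs t rest) := by
  intro rest
  induction rest with
  | nil =>
    intro t frames0 hdrop
    have hle : cs.length ≤ t := by
      by_contra h
      have := congrArg List.length hdrop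
      simp at this
      omega
    simp [PySem.List.enumerate, blocksF, List.take_of_length_le hle,
      show cs.length - t = 0 from by omega, show cs.length - (t + cs.length) = 0 from by omega]
  | cons c r ih =>
    intro t frames0 hdrop
    have hlen : cs.length = t + r.length + 1 := by
      have := congrArg List.length hdrop
      simp at this
      omega
    have htn : t < cs.length := by omega
    have hget : cs[t]? = some c := by
      have h0 : (cs.drop t)[0]? = some c := by rw [hdrop]; rfl
      rwa [List.getElem?_drop, Nat.add_zero] at h0
    have hdrop' : cs.drop (t + 1) = r := by
      have : cs.drop (t + 1) = (cs.drop t).drop 1 := by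
        rw [List.drop_drop]
      rw [this, hdrop]
      rfl
    have ht' : (cs.take t).length = t := by simp [List.length_take]; omega
    rw [PySem.List.enumerate_cons, List.foldl_cons]
    -- compute the step
    have hframe : PySem.List.slice (cs.take t ++ List.replicate (cs.length - t) '.') none (some (-1)) ++ [c]
        = pvFrm cs t (cs.length - 1) c := by
      rw [PySem.List.slice_to_neg_one, List.dropLast_append]
      simp only [pvFrm]
      rw [List.dropLast_replicate]
      rw [show cs.length - 1 - (cs.length - 1) = 0 from by omega,
        show cs.length - t - 1 = cs.length - 1 - t from by omega]
      simp [show (List.replicate (cs.length - t) '.').isEmpty = false from by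
        simp; omega]
    have hstep : aStep cs.length (cs.take t ++ List.replicate (cs.length - t) '.', frames0) ((t : Int), c)
        = (pvFrm cs t t c, frames0 ++ blockF cs t c) := by
      simp only [aStep, hframe]
      rw [show ((cs.length : Int) - 1) = ((t + (cs.length - 1 - t) : Nat) : Int) from by push_cast; omega]
      rw [aWhile_eq cs c t (cs.length - 1 - t) (cs.length + 1) _ _ (by omega) (by omega) ?_]
      · simp only [blockF]
        rw [show t + (cs.length - 1 - t) = cs.length - 1 from by omega,
          show cs.length - 1 - t + 1 = cs.length - t from by omega]
        simp
      · -- take hypothesis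
        simp only [pvFrm]
        rw [show cs.length - 1 - (cs.length - 1) = 0 from by omega]
        simp only [List.replicate_zero, List.append_nil, List.append_assoc]
        rw [List.take_append, List.take_of_length_le (by rw [ht']; omega), ht',
          List.take_append, List.length_replicate, List.take_replicate]
        rw [show min (t + (cs.length - 1 - t) - t) (cs.length - 1 - t) = cs.length - 1 - t from by omega,
          show t + (cs.length - 1 - t) - t - (cs.length - 1 - t) = 0 from by omega]
        simp
    rw [hstep]
    have hfrm1 : pvFrm cs t t c = cs.take (t + 1) ++ List.replicate (cs.length - (t + 1)) '.' := by
      simp only [pvFrm]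
      rw [List.take_add_one, hget, show t - t = 0 from by omega,
        show cs.length - 1 - t = cs.length - (t + 1) from by omega]
      simp
    rw [show ((t : Int) + 1) = ((t + 1 : Nat) : Int) from by push_cast; ring, hfrm1]
    rw [ih (t + 1) (frames0 ++ blockF cs t c) hdrop']
    simp [blocksF, List.append_assoc, show cs.length - (t + cs.length) = 0 from by omega,
      show cs.length - (t + 1 + cs.length) = 0 from by omega]

theorem bSeq_eq (cs : List Char) (t : Nat) (c : Char) (ht : t < cs.length) :
    bSeq cs cs.length (t : Int) c
      = (List.range (cs.length - t)).map (fun j => pvFrm cs t (cs.length - 1 - j) c) := by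
  unfold bSeq
  rw [show ((cs.length : Int) - (t : Int)) = ((cs.length - t : Nat) : Int) from by omega]
  rw [PySem.List.pyRange_zero_natCast, List.map_map]
  apply List.map_congr_left
  intro j hj
  rw [List.mem_range] at hj
  simp only [Function.comp_apply]
  rw [PySem.List.slice_to_natCast, PySem.List.pyRepeat_singleton, PySem.List.pyRepeat_singleton]
  simp only [pvFrm]
  rw [show (((cs.length : Int)) - 1 - (j : Int) - (t : Int)).toNat = cs.length - 1 - j - t from by omega,
    Int.toNat_natCast,
    show cs.length - 1 - (cs.length - 1 - j) = j from by omega]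

theorem bFold_eq (cs : List Char) : ∀ (rest : List Char) (t : Nat) (frames0 : List (List Char)),
    cs.drop t = rest →
    (PySem.List.enumerate rest (t : Int)).foldl
        (fun (frames : List (List Char)) p =>
          frames ++ [PySem.List.pyGetD (bSeq cs cs.length p.1 p.2) 0 []]
            ++ bSeq cs cs.length p.1 p.2)
        frames0
      = frames0 ++ blocksF cs t rest := by
  intro rest
  induction rest with
  | nil => intro t frames0 _; simp [PySem.List.enumerate, blocksF]
  | cons c r ih =>
    intro t frames0 hdrop
    have hlen : cs.length = t + r.length + 1 := by
      have := congrArg List.length hdrop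
      simp at this
      omega
    have htn : t < cs.length := by omega
    have hdrop' : cs.drop (t + 1) = r := by
      have : cs.drop (t + 1) = (cs.drop t).drop 1 := by rw [List.drop_drop]
      rw [this, hdrop]
      rfl
    rw [PySem.List.enumerate_cons, List.foldl_cons]
    rw [show ((t : Int) + 1) = ((t + 1 : Nat) : Int) from by push_cast; ring]
    have hseq := bSeq_eq cs t c htn
    have hhead : PySem.List.pyGetD (bSeq cs cs.length (t : Int) c) 0 [] = pvFrm cs t (cs.length - 1) c := by
      rw [hseq, PySem.List.pyGetD_zero, List.getD_eq_getElem?_getD, List.getElem?_map,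
        List.getElem?_range (by omega : 0 < cs.length - t)]
      simp
    rw [hhead, hseq, ih (t + 1) _ hdrop']
    simp only [blocksF, blockF]
    simp [List.append_assoc]

-- ===== VERDICT (by name: the statement is the Claim_ definition above) =====
theorem generate_word_animation_spec : Claim_equal_generate_word_animation := by
  intro word _
  unfold Spec_generate_word_animation
  simp only [generate_word_animation, generate_word_animation_alt]
  have hA := aFold_eq word.toList word.toList 0 [List.replicate word.toList.length '.'] (by simp)
  have hB := bFold_eq word.toList word.toList 0 [List.replicate word.toList.length '.'] (by simp)
  simp only [List.take_zero, Nat.sub_zero, List.nil_append, Nat.cast_zero] at hA hB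
  rw [hA, hB]
  rfl
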